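-- pv_equiv track=rewrite | github.com/Domusgpt/vib3code | process_interactive_post.py | extract_frontmatter_and_content
-- ===== SOURCE A (Python) =====
-- def extract_frontmatter_and_content(file_content):
--     frontmatter_str = []
--     content_lines = []
--     in_frontmatter = False
--     frontmatter_delimiters = 0
--
--     for line in file_content.splitlines():
--         if line.strip() == '---':
--             frontmatter_delimiters += 1
--             if frontmatter_delimiters == 1:
--                 in_frontmatter = True
--                 continue
--             elif frontmatter_delimiters == 2:
--                 in_frontmatter = False
--                 continue
--
--         if in_frontmatter:
--             frontmatter_str.append(line)
--         elif frontmatter_delimiters >= 2: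
--             content_lines.append(line)
--
--     if frontmatter_delimiters < 2:
--         return None, file_content
--
--     return '\n'.join(frontmatter_str), '\n'.join(content_lines)
-- ===== SOURCE B (Python) =====
-- def extract_frontmatter_and_content(file_content):
--     lines = file_content.splitlines()
--     delims = [k for k, line in enumerate(lines) if line.strip() == '---']
--     if len(delims) < 2:
--         return None, file_content
--     i, j = delims[0], delims[1]
--     return '\n'.join(lines[i + 1:j]), '\n'.join(lines[j + 1:])
-- ===== Notes on version B (the rewrite author's own statement) =====
-- stated objective: simpler
-- what changed: Replaces the stateful one-pass flag/counter machine with locating the first two '---' delimiter lines by index and slicing the line list, instead of accumulating lines under mutable flags.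
import Mathlib
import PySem

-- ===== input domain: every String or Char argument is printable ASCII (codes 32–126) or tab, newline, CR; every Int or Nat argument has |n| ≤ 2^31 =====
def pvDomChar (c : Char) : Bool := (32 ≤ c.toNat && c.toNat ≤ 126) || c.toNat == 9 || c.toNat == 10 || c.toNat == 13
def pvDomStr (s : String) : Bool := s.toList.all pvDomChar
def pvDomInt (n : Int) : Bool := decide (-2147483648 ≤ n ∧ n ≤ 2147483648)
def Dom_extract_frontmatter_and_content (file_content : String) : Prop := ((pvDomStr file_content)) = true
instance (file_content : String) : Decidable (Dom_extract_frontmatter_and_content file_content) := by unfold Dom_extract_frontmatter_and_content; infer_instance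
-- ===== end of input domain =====

-- B locates the first two '---' delimiter lines by index and slices the line list,
-- instead of A's stateful one-pass flag/counter accumulation; objective: simpler.

-- ===== PORT A =====
-- the loop body of A, one line at a time over the state (frontmatter_str, content_lines, in_frontmatter, frontmatter_delimiters)
def pvStepA (st : List String × List String × Bool × Int) (line : String) :
    List String × List String × Bool × Int :=
  match st with
  | (fm, ct, inf, d) =>
    if PySem.Str.strip line == "---" then
      let d' := d + 1
      if d' == 1 then (fm, ct, true, d')
      else if d' == 2 then (fm, ct, false, d')
      else
        if inf then (fm ++ [line], ct, inf, d')
        else if 2 ≤ d' then (fm, ct ++ [line], inf, d')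
        else (fm, ct, inf, d')
    else
      if inf then (fm ++ [line], ct, inf, d)
      else if 2 ≤ d then (fm, ct ++ [line], inf, d)
      else (fm, ct, inf, d)

def extract_frontmatter_and_content (file_content : String) : Option String × String :=
  let st := (PySem.Str.splitlines file_content).foldl pvStepA ([], [], false, (0 : Int))
  if st.2.2.2 < 2 then (none, file_content)
  else (some (PySem.Str.join "\n" st.1), PySem.Str.join "\n" st.2.1)

-- ===== PORT B =====
-- [k for k, line in enumerate(lines) if line.strip() == '---']
def pvDelims (lines : List String) : List Int :=
  (PySem.List.enumerate lines 0).filterMap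
    (fun p => if PySem.Str.strip p.2 == "---" then some p.1 else none)

def extract_frontmatter_and_content_alt (file_content : String) : Option String × String :=
  let lines := PySem.Str.splitlines file_content
  match pvDelims lines with
  | i :: j :: _ =>
      (some (PySem.Str.join "\n" (PySem.List.slice lines (some (i + 1)) (some j))),
       PySem.Str.join "\n" (PySem.List.slice lines (some (j + 1)) none))
  | _ => (none, file_content)

-- ===== PRECONDITION & SPEC =====
def Spec_extract_frontmatter_and_content (file_content : String) (out : Option String × String) : Prop := out = extract_frontmatter_and_content_alt file_content
instance (file_content : String) (out : Option String × String) : Decidable (Spec_extract_frontmatter_and_content file_content out) := by unfold Spec_extract_frontmatter_and_content; infer_instance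

-- ===== CLAIM (what is proved, stated in full; the proofs are below) =====
def Claim_equal_extract_frontmatter_and_content : Prop := ∀ (file_content : String), Dom_extract_frontmatter_and_content file_content → Spec_extract_frontmatter_and_content file_content (extract_frontmatter_and_content file_content)

-- ===== LEMMAS AND PROOFS =====

-- no delimiter line contributes nothing to pvDelims-style filterMap, at any start offset
theorem pv_filterMap_enum_nil (xs : List String) (s : Int)
    (h : ∀ l ∈ xs, (PySem.Str.strip l == "---") = false) :
    (PySem.List.enumerate xs s).filterMap
      (fun p => if PySem.Str.strip p.2 == "---" then some p.1 else none) = [] := by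
  induction xs generalizing s with
  | nil => simp [PySem.List.enumerate_nil]
  | cons x xs ih =>
      rw [PySem.List.enumerate_cons]
      simp only [List.filterMap_cons]
      rw [if_neg (by simp [h x (by simp)])]
      exact ih (s + 1) (fun l hl => h l (by simp [hl]))

-- A's loop: before the first delimiter nothing changes
theorem pv_foldA_pre (xs : List String) (fm ct : List String)
    (h : ∀ l ∈ xs, (PySem.Str.strip l == "---") = false) :
    xs.foldl pvStepA (fm, ct, false, (0 : Int)) = (fm, ct, false, 0) := by
  induction xs with
  | nil => rfl
  | cons x xs ih =>
      simp only [List.foldl_cons]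
      rw [show pvStepA (fm, ct, false, (0 : Int)) x = (fm, ct, false, 0) by
        simp [pvStepA, h x (by simp)]]
      exact ih (fun l hl => h l (by simp [hl]))

-- A's loop: inside the frontmatter every non-delimiter line is appended to fm
theorem pv_foldA_mid (xs : List String) (fm ct : List String)
    (h : ∀ l ∈ xs, (PySem.Str.strip l == "---") = false) :
    xs.foldl pvStepA (fm, ct, true, (1 : Int)) = (fm ++ xs, ct, true, 1) := by
  induction xs generalizing fm with
  | nil => simp
  | cons x xs ih =>
      simp only [List.foldl_cons]
      rw [show pvStepA (fm, ct, true, (1 : Int)) x = (fm ++ [x], ct, true, 1) by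
        simp [pvStepA, h x (by simp)]]
      rw [ih (fm ++ [x]) (fun l hl => h l (by simp [hl]))]
      simp

-- A's loop: after the second delimiter every line (delimiter or not) goes to ct
theorem pv_foldA_post (xs : List String) (fm ct : List String) (d : Int) (hd : 2 ≤ d) :
    ∃ d', 2 ≤ d' ∧ xs.foldl pvStepA (fm, ct, false, d) = (fm, ct ++ xs, false, d') := by
  induction xs generalizing ct d with
  | nil => exact ⟨d, hd, by simp⟩
  | cons x xs ih =>
      simp only [List.foldl_cons]
      by_cases hx : (PySem.Str.strip x == "---") = true
      · rw [show pvStepA (fm, ct, false, d) x = (fm, ct ++ [x], false, d + 1) by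
          simp only [pvStepA]
          rw [if_pos hx, if_neg (by simp; omega), if_neg (by simp; omega),
            if_neg (by simp), if_pos (by omega)]]
        obtain ⟨d', hd', he⟩ := ih (ct ++ [x]) (d + 1) (by omega)
        exact ⟨d', hd', by rw [he]; simp⟩
      · rw [show pvStepA (fm, ct, false, d) x = (fm, ct ++ [x], false, d) by
          simp only [pvStepA]
          rw [if_neg hx, if_neg (by simp), if_pos hd]]
        obtain ⟨d', hd', he⟩ := ih (ct ++ [x]) d hd
        exact ⟨d', hd', by rw [he]; simp⟩

-- pvDelims of a line list with exactly one delimiter line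
theorem pv_delims_one (pre mid : List String) (d1 : String)
    (hpre : ∀ l ∈ pre, (PySem.Str.strip l == "---") = false)
    (hmid : ∀ l ∈ mid, (PySem.Str.strip l == "---") = false)
    (hd1 : (PySem.Str.strip d1 == "---") = true) :
    pvDelims (pre ++ d1 :: mid) = [(pre.length : Int)] := by
  unfold pvDelims
  rw [PySem.List.enumerate_append, List.filterMap_append, pv_filterMap_enum_nil pre 0 hpre,
    PySem.List.enumerate_cons, List.filterMap_cons]
  simp only [if_pos hd1]
  rw [pv_filterMap_enum_nil mid _ hmid]
  simp

-- pvDelims of a line list with at least two delimiter lines: first two indices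
theorem pv_delims_two (pre mid post : List String) (d1 d2 : String)
    (hpre : ∀ l ∈ pre, (PySem.Str.strip l == "---") = false)
    (hmid : ∀ l ∈ mid, (PySem.Str.strip l == "---") = false)
    (hd1 : (PySem.Str.strip d1 == "---") = true)
    (hd2 : (PySem.Str.strip d2 == "---") = true) :
    ∃ t, pvDelims (pre ++ d1 :: (mid ++ d2 :: post))
      = (pre.length : Int) :: ((pre.length : Int) + 1 + mid.length) :: t := by
  unfold pvDelims
  rw [PySem.List.enumerate_append, List.filterMap_append, pv_filterMap_enum_nil pre 0 hpre,
    PySem.List.enumerate_cons, List.filterMap_cons]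
  simp only [if_pos hd1]
  rw [PySem.List.enumerate_append, List.filterMap_append, pv_filterMap_enum_nil mid _ hmid,
    PySem.List.enumerate_cons, List.filterMap_cons]
  simp only [if_pos hd2]
  exact ⟨List.filterMap (fun q => if (PySem.Str.strip q.2 == "---") = true then some q.1 else none)
      (PySem.List.enumerate post ((pre.length : Int) + 1 + mid.length + 1)),
    by simp⟩

-- the main equivalence, stated over the line list
theorem pv_main (lines : List String) (fc : String) :
    (if (lines.foldl pvStepA ([], [], false, (0 : Int))).2.2.2 < 2 then ((none : Option String), fc)
     else (some (PySem.Str.join "\n" (lines.foldl pvStepA ([], [], false, (0 : Int))).1),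
           PySem.Str.join "\n" (lines.foldl pvStepA ([], [], false, (0 : Int))).2.1))
    = (match pvDelims lines with
       | i :: j :: _ =>
           (some (PySem.Str.join "\n" (PySem.List.slice lines (some (i + 1)) (some j))),
            PySem.Str.join "\n" (PySem.List.slice lines (some (j + 1)) none))
       | _ => ((none : Option String), fc)) := by
  have hsplit := List.takeWhile_append_dropWhile
    (p := fun l => !(PySem.Str.strip l == "---")) (l := lines)
  set p : String → Bool := fun l => !(PySem.Str.strip l == "---") with hp
  have hpre : ∀ l ∈ lines.takeWhile p, (PySem.Str.strip l == "---") = false := by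
    intro l hl
    have := List.mem_takeWhile_imp hl
    simpa [hp] using this
  cases hrest : lines.dropWhile p with
  | nil =>
      have hlines : lines.takeWhile p = lines := by
        conv_rhs => rw [← hsplit]
        rw [hrest]; simp
      have hall : ∀ l ∈ lines, (PySem.Str.strip l == "---") = false := fun l hl =>
        hpre l (by rw [hlines]; exact hl)
      rw [pv_foldA_pre lines [] [] hall,
        show pvDelims lines = [] from pv_filterMap_enum_nil lines 0 hall]
      norm_num
  | cons d1 r1 =>
      have hd1 : (PySem.Str.strip d1 == "---") = true := by
        have h2 : lines.dropWhile p ≠ [] := by rw [hrest]; simp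
        have := List.head_dropWhile_not p h2
        simp only [hrest, List.head_cons] at this
        simpa [hp] using this
      have hlines : lines = lines.takeWhile p ++ d1 :: r1 := by
        conv_lhs => rw [← hsplit]
        rw [hrest]
      have hmid : ∀ l ∈ r1.takeWhile p, (PySem.Str.strip l == "---") = false := by
        intro l hl
        have := List.mem_takeWhile_imp hl
        simpa [hp] using this
      cases hrest2 : r1.dropWhile p with
      | nil =>
          have hr1 : r1.takeWhile p = r1 := by
            conv_rhs => rw [← List.takeWhile_append_dropWhile (p := p) (l := r1)]
            rw [hrest2]; simp
          have hallr1 : ∀ l ∈ r1, (PySem.Str.strip l == "---") = false := fun l hl =>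
            hmid l (by rw [hr1]; exact hl)
          rw [hlines, List.foldl_append, pv_foldA_pre _ [] [] hpre, List.foldl_cons,
            show pvStepA ([], [], false, (0 : Int)) d1 = ([], [], true, 1) from by
              simp only [pvStepA]; rw [if_pos hd1]; norm_num,
            pv_foldA_mid r1 [] [] hallr1,
            pv_delims_one _ r1 d1 hpre hallr1 hd1]
          norm_num
      | cons d2 post =>
          have hd2 : (PySem.Str.strip d2 == "---") = true := by
            have h2 : r1.dropWhile p ≠ [] := by rw [hrest2]; simp
            have := List.head_dropWhile_not p h2
            simp only [hrest2, List.head_cons] at this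
            simpa [hp] using this
          have hr1 : r1 = r1.takeWhile p ++ d2 :: post := by
            conv_lhs => rw [← List.takeWhile_append_dropWhile (p := p) (l := r1)]
            rw [hrest2]
          have hlines2 : lines = lines.takeWhile p ++ d1 :: (r1.takeWhile p ++ d2 :: post) := by
            conv_lhs => rw [hlines]
            rw [← hr1]
          obtain ⟨t, ht⟩ := pv_delims_two (lines.takeWhile p) (r1.takeWhile p) post d1 d2
            hpre hmid hd1 hd2
          obtain ⟨d', hd', he⟩ := pv_foldA_post post (r1.takeWhile p) [] 2 (by omega)
          have hs1 : PySem.List.slice (lines.takeWhile p ++ d1 :: (r1.takeWhile p ++ d2 :: post))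
              (some (((lines.takeWhile p).length : Int) + 1))
              (some (((lines.takeWhile p).length : Int) + 1 + ((r1.takeWhile p).length : Int)))
              = r1.takeWhile p := by
            rw [show (((lines.takeWhile p).length : Int) + 1 + ((r1.takeWhile p).length : Int))
                = (((lines.takeWhile p).length + 1 + (r1.takeWhile p).length : Nat) : Int) by
                push_cast; ring,
              show (((lines.takeWhile p).length : Int) + 1)
                = (((lines.takeWhile p).length + 1 : Nat) : Int) by push_cast; ring,
              PySem.List.slice_natCast,
              show lines.takeWhile p ++ d1 :: (r1.takeWhile p ++ d2 :: post)
                = (lines.takeWhile p ++ [d1]) ++ (r1.takeWhile p ++ d2 :: post) by simp,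
              List.drop_left' (by simp),
              show (lines.takeWhile p).length + 1 + (r1.takeWhile p).length
                - ((lines.takeWhile p).length + 1) = (r1.takeWhile p).length by omega]
            exact List.take_left' rfl
          have hs2 : PySem.List.slice (lines.takeWhile p ++ d1 :: (r1.takeWhile p ++ d2 :: post))
              (some (((lines.takeWhile p).length : Int) + 1 + ((r1.takeWhile p).length : Int) + 1))
              none = post := by
            rw [show (((lines.takeWhile p).length : Int) + 1 + ((r1.takeWhile p).length : Int) + 1)
                = (((lines.takeWhile p).length + 1 + (r1.takeWhile p).length + 1 : Nat) : Int) by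
                push_cast; ring,
              PySem.List.slice_from_natCast,
              show lines.takeWhile p ++ d1 :: (r1.takeWhile p ++ d2 :: post)
                = (lines.takeWhile p ++ d1 :: (r1.takeWhile p ++ [d2])) ++ post by simp]
            exact List.drop_left' (by simp; omega)
          rw [hlines2, List.foldl_append, pv_foldA_pre _ [] [] hpre, List.foldl_cons,
            show pvStepA ([], [], false, (0 : Int)) d1 = ([], [], true, 1) from by
              simp only [pvStepA]; rw [if_pos hd1]; norm_num,
            List.foldl_append, pv_foldA_mid (r1.takeWhile p) [] [] hmid, List.foldl_cons,
            show pvStepA ([] ++ r1.takeWhile p, [], true, (1 : Int)) d2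
                = (r1.takeWhile p, [], false, 2) from by
              simp only [pvStepA]; rw [if_pos hd2]; norm_num,
            he, ht]
          rw [if_neg (by simp; omega)]
          simp [hs1, hs2]

-- ===== VERDICT (by name: the statement is the Claim_ definition above) =====
theorem extract_frontmatter_and_content_spec : Claim_equal_extract_frontmatter_and_content := by
  intro fc _
  unfold Spec_extract_frontmatter_and_content extract_frontmatter_and_content
    extract_frontmatter_and_content_alt
  exact pv_main (PySem.Str.splitlines fc) fc
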